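-- pv_equiv track=rewrite | github.com/djestrab/coursera | BioInf/stepik.py | approx_pattern_count
-- ===== SOURCE A (Python) =====
-- def hamming_distance(p, q):
--     """ Returns number of mismatches between two strings """
--
--     h = 0
--     for i, char in enumerate(p):
--         if char != q[i]:
--             h += 1
--     return h
--
-- def approx_pattern_count(pattern, text, d):
--     """ Returns number of times where pattern appears as a substring of text with at most d mismatches."""
--
--     l1 = len(pattern)
--     l2 = len(text)
--     count = 0
--     for i in range(0, l2-l1+1):
--         if hamming_distance(pattern, text[i:i+l1]) <= d:
--             count += 1
--     return count
-- ===== SOURCE B (Python) =====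
-- def approx_pattern_count(pattern, text, d):
--     """ Returns number of times where pattern appears as a substring of text with at most d mismatches.
--     Builds a frequency table of the windows once, then does ONE Hamming scan per DISTINCT window. """
--     k = len(pattern)
--     windows = [text[i:i+k] for i in range(len(text) - k + 1)]
--     freq = {}
--     for w in windows:
--         freq[w] = freq.get(w, 0) + 1
--     total = 0
--     for w, c in freq.items():
--         if sum(1 for a, b in zip(pattern, w) if a != b) <= d:
--             total += c
--     return total
-- ===== Notes on version B (the rewrite author's own statement) =====
-- stated objective: alternative
-- what changed: Instead of running a fresh Hamming scan for every window of the text, B builds a frequency table of all len(pattern)-windows once and then does a single Hamming comparison per DISTINCT window, summing the stored multiplicities.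
import Mathlib
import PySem

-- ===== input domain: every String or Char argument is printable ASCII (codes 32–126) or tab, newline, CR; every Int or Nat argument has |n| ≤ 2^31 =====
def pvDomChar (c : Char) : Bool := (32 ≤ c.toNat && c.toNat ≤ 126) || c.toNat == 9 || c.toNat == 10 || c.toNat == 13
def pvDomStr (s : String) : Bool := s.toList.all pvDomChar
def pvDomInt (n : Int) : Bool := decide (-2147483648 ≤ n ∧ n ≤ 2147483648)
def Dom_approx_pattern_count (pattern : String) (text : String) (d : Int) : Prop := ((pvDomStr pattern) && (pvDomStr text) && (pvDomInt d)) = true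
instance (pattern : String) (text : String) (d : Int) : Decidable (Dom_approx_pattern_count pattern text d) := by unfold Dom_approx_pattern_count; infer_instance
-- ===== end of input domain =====

-- B replaces A's per-window Hamming scan with a window-frequency table and one Hamming scan
-- per DISTINCT window (objective: alternative; equal return value proved below).

-- ===== PORT A =====
-- hamming_distance(p, q): loop over enumerate(p) indexing q.  At every call site inside
-- approx_pattern_count the index is in range (the slice has full length), so the `none`
-- branch (Python's IndexError) is unreachable there.
def hammingA (p q : List Char) : Int :=
  (PySem.List.enumerate p 0).foldl
    (fun h ic =>
      match PySem.List.pyGet? q ic.1 with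
      | some c => if ic.2 ≠ c then h + 1 else h
      | none => h + 1)
    0

def approx_pattern_count (pattern : String) (text : String) (d : Int) : Int :=
  let pl := pattern.toList
  let tl := text.toList
  let l1 : Int := pl.length
  let l2 : Int := tl.length
  (PySem.List.pyRange 0 (l2 - l1 + 1) 1).foldl
    (fun count i =>
      if hammingA pl (PySem.List.slice tl (some i) (some (i + l1))) ≤ d then count + 1
      else count)
    0

-- ===== PORT B =====
-- sum(1 for a, b in zip(pattern, w) if a != b)
def hammingB (p w : List Char) : Int :=
  ((p.zip w).countP (fun ab => ab.1 != ab.2) : Int)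

def approx_pattern_count_alt (pattern : String) (text : String) (d : Int) : Int :=
  let pl := pattern.toList
  let tl := text.toList
  let k : Int := pl.length
  let windows := (PySem.List.pyRange 0 ((tl.length : Int) - k + 1) 1).map
    (fun i => PySem.List.slice tl (some i) (some (i + k)))
  let freq : PySem.Dict (List Char) Int :=
    windows.foldl (fun fr w => fr.modify w 0 (· + 1)) PySem.Dict.empty
  freq.items.foldl
    (fun total kv => if hammingB pl kv.1 ≤ d then total + kv.2 else total)
    0

-- ===== PRECONDITION & SPEC =====
def Spec_approx_pattern_count (pattern : String) (text : String) (d : Int) (out : Int) : Prop := out = approx_pattern_count_alt pattern text d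
instance (pattern : String) (text : String) (d : Int) (out : Int) : Decidable (Spec_approx_pattern_count pattern text d out) := by unfold Spec_approx_pattern_count; infer_instance

-- ===== CLAIM (what is proved, stated in full; the proofs are below) =====
def Claim_equal_approx_pattern_count : Prop := ∀ (pattern : String) (text : String) (d : Int), Dom_approx_pattern_count pattern text d → Spec_approx_pattern_count pattern text d (approx_pattern_count pattern text d)

-- ===== LEMMAS AND PROOFS =====

-- A's hamming loop equals the zip count when q is long enough (invariant over the start index).
lemma hammingA_go (p : List Char) (q : List Char) :
    ∀ (s : Nat) (acc : Int), s + p.length ≤ q.length →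
    (PySem.List.enumerate p (s : Int)).foldl
      (fun h ic =>
        match PySem.List.pyGet? q ic.1 with
        | some c => if ic.2 ≠ c then h + 1 else h
        | none => h + 1)
      acc
    = acc + (((p.zip (q.drop s)).countP (fun ab => ab.1 != ab.2) : Nat) : Int) := by
  induction p with
  | nil => intro s acc _; simp [PySem.List.enumerate_nil]
  | cons a p ih =>
    intro s acc hlen
    have hs : s < q.length := by simp at hlen; omega
    rw [PySem.List.enumerate_cons]
    have hdrop : q.drop s = q[s] :: q.drop (s + 1) := (List.getElem_cons_drop hs).symm
    have hget : PySem.List.pyGet? q (s : Int) = some q[s] := by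
      simp [PySem.List.pyGet?_natCast, List.getElem?_eq_getElem hs]
    have hcast : ((s : Int) + 1) = ((s + 1 : Nat) : Int) := by push_cast; ring
    rw [List.foldl_cons, hdrop]
    simp only [hget, hcast]
    rw [ih (s + 1) _ (by simp only [List.length_cons] at hlen; omega)]
    simp only [List.zip_cons_cons, List.countP_cons]
    by_cases hab : a = q[s]
    · simp [hab]
    · simp [hab]; omega

lemma hammingA_eq_hammingB (p q : List Char) (h : p.length ≤ q.length) :
    hammingA p q = hammingB p q := by
  have := hammingA_go p q 0 0 (by omega)
  simpa [hammingA, hammingB] using this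

-- sum over a nodup list of an indicator at w
lemma sum_map_ite_eq {α : Type} [DecidableEq α] (f : α → Int) (w : α) :
    ∀ (D : List α), D.Nodup → w ∈ D →
    (D.map (fun k => if k = w then f k else 0)).sum = f w := by
  intro D
  induction D with
  | nil => intro _ h; cases h
  | cons a D ih =>
    intro hnd hw
    by_cases haw : a = w
    · subst haw
      have hnot : a ∉ D := (List.nodup_cons.mp hnd).1
      have hz : (D.map (fun k => if k = a then f k else 0)).sum = 0 := by
        apply List.sum_eq_zero
        intro x hx
        rcases List.mem_map.mp hx with ⟨k, hk, rfl⟩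
        have hka : k ≠ a := fun h => hnot (h ▸ hk)
        simp [hka]
      simp [hz]
    · have hwD : w ∈ D := by
        rcases List.mem_cons.mp hw with h | h
        · exact absurd h.symm haw
        · exact h
      simp [haw, ih (List.nodup_cons.mp hnd).2 hwD]

-- grouped count: summing (count in W) over the distinct keys = countP over W
lemma sum_grouped {α : Type} [BEq α] [LawfulBEq α] [DecidableEq α] (p : α → Prop) [DecidablePred p]
    (D : List α) (hD : D.Nodup) :
    ∀ (W : List α), (∀ w ∈ W, w ∈ D) →
    (D.map (fun k => if p k then ((W.count k : Nat) : Int) else 0)).sum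
      = ((W.countP (fun w => decide (p w)) : Nat) : Int) := by
  intro W
  induction W with
  | nil => intro _; simp
  | cons w W ih =>
    intro hmem
    have hW : ∀ x ∈ W, x ∈ D := fun x hx => hmem x (List.mem_cons_of_mem _ hx)
    have hw : w ∈ D := hmem w (List.mem_cons_self)
    have hsplit : (D.map (fun k => if p k then (((w :: W).count k : Nat) : Int) else 0)).sum
        = (D.map (fun k => if p k then ((W.count k : Nat) : Int) else 0)).sum
          + (D.map (fun k => if k = w then (if p k then (1 : Int) else 0) else 0)).sum := by
      rw [← List.sum_map_add]
      apply congrArg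
      apply List.map_congr_left
      intro k _
      by_cases hkw : k = w
      · subst hkw
        by_cases hpk : p k <;> simp [hpk]
      · simp [hkw, Ne.symm hkw]
    rw [hsplit, ih hW, sum_map_ite_eq _ w D hD hw, List.countP_cons]
    by_cases hpw : p w <;> simp [hpw]

-- every window has at least pattern length many characters
lemma window_len (tl : List Char) (L1 : Nat) (i : Int)
    (h0 : 0 ≤ i) (h1 : i < (tl.length : Int) - L1 + 1) :
    L1 ≤ (PySem.List.slice tl (some i) (some (i + (L1 : Int)))).length := by
  rw [PySem.List.slice_toNat (ha := h0) (hb := by omega)]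
  simp only [List.length_take, List.length_drop]
  have e1 : (i + (L1 : Int)).toNat = i.toNat + L1 := by omega
  have e2 : i.toNat + L1 ≤ tl.length := by omega
  omega

-- ===== VERDICT (by name: the statement is the Claim_ definition above) =====
theorem approx_pattern_count_spec : Claim_equal_approx_pattern_count := by
  intro pattern text d _
  unfold Spec_approx_pattern_count approx_pattern_count approx_pattern_count_alt
  set pl := pattern.toList with hpl
  set tl := text.toList with htl
  set W := (PySem.List.pyRange 0 ((tl.length : Int) - (pl.length : Int) + 1) 1).map
    (fun i => PySem.List.slice tl (some i) (some (i + (pl.length : Int)))) with hW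
  -- A: fold over the range = fold over the window list = countP
  have hA : (PySem.List.pyRange 0 ((tl.length : Int) - (pl.length : Int) + 1) 1).foldl
      (fun count i =>
        if hammingA pl (PySem.List.slice tl (some i) (some (i + (pl.length : Int)))) ≤ d
        then count + 1 else count) 0
      = ((W.countP (fun w => decide (hammingA pl w ≤ d)) : Nat) : Int) := by
    rw [PySem.List.foldl_ite_add_one, hW, List.countP_map]
    simp only [zero_add]
    rfl
  -- B: counter + items
  have hB : (W.foldl (fun fr w => fr.modify w 0 (· + 1)) PySem.Dict.empty).items.foldl
      (fun total kv => if hammingB pl kv.1 ≤ d then total + kv.2 else total) 0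
      = ((PySem.Set.ofList W).map
          (fun k => if hammingB pl k ≤ d then ((W.count k : Nat) : Int) else 0)).sum := by
    rw [← PySem.Dict.counter_eq_foldl, PySem.Dict.items_counter, List.foldl_map]
    have hfun : (fun (total : Int) (k : List Char) =>
        if hammingB pl k ≤ d then total + ((W.count k : Nat) : Int) else total)
        = (fun total k => total + (if hammingB pl k ≤ d then ((W.count k : Nat) : Int) else 0)) := by
      funext t k; by_cases h : hammingB pl k ≤ d <;> simp [h]
    rw [hfun, PySem.List.foldl_add]
    simp
  rw [hA, hB]
  have hG := sum_grouped (p := fun k => hammingB pl k ≤ d) (PySem.Set.ofList W)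
    (PySem.Set.nodup_ofList W) W (fun w hw => (PySem.Set.mem_ofList W w).mpr hw)
  have hC : ((W.countP (fun w => decide (hammingA pl w ≤ d)) : Nat) : Int)
      = ((W.countP (fun w => decide (hammingB pl w ≤ d)) : Nat) : Int) := by
    congr 1
    apply List.countP_congr
    intro w hw
    rcases List.mem_map.mp hw with ⟨i, hi, rfl⟩
    have hmem := PySem.List.mem_pyRange_one.mp hi
    rw [hammingA_eq_hammingB pl _ (window_len tl pl.length i hmem.1 (by exact_mod_cast hmem.2))]
  exact hC.trans hG.symm
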